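-- pv_equiv track=rewrite | github.com/DancingOnAir/LeetcodePythonSolution | string/1663_smallest_string_with_a_given_numeric_value.py | getSmallestString1
-- ===== SOURCE A (Python) =====
-- import string
--
-- def getSmallestString1(n: int, k: int) -> str:
--     def helper(q, r):
--         if q + r == n:
--             return 'a' * r + 'z' * q
--         elif q + r > n:
--             num_a = n - q - 1
--             return 'a' * num_a + string.ascii_lowercase[r - num_a - 1] + 'z' * q
--         else:
--             while q + r < n:
--                 q -= 1
--                 r += 26
--             return helper(q, r)
--
--     q, r = divmod(k, 26)
--     return helper(q, r)
-- ===== SOURCE B (Python) =====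
-- import string
--
-- def getSmallestString1(n: int, k: int) -> str:
--     q, r = divmod(k, 26)
--     if q + r < n:
--         # closed form for A's while-loop: j steps of (q -= 1, r += 26) until q + r >= n
--         j = (n - q - r + 24) // 25
--         q, r = q - j, r + 26 * j
--     if q + r == n:
--         return 'a' * r + 'z' * q
--     return 'a' * (n - q - 1) + string.ascii_lowercase[q + r - n] + 'z' * q
-- ===== Notes on version B (the rewrite author's own statement) =====
-- stated objective: faster
-- what changed: Replaces A's interpreted while-loop re-balancing (one Python iteration per 25 of deficit) and its recursive helper by a single closed-form step count j = (n - q - r + 24) // 25 applied at once, followed by the two direct final branches.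
import Mathlib
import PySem

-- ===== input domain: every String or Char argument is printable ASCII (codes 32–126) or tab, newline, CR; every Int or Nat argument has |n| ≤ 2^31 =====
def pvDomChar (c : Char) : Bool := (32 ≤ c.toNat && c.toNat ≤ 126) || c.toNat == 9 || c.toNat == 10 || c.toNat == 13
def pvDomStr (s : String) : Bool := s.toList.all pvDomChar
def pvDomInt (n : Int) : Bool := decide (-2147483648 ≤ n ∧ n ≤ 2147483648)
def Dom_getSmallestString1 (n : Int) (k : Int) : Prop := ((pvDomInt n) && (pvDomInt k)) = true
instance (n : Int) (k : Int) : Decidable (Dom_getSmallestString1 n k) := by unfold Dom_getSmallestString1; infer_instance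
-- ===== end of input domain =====

-- B replaces A's while-loop re-balancing and recursive helper by a closed-form step count
-- applied once (closed form instead of the loop, intended to be faster: the per-iteration
-- interpreted loop disappears).


-- ===== PORT A =====
-- 'c' * m  (Python repeat: empty for m ≤ 0) — exact
def pvRep (c : Char) (m : Int) : List Char := List.replicate m.toNat c

-- string.ascii_lowercase
def pvAscii : List Char := "abcdefghijklmnopqrstuvwxyz".toList

-- the inner  while q + r < n: q -= 1; r += 26
-- (structural fuel recursion; each pass raises q + r by 25, so (n - (q+r)).toNat passes
-- always suffice and the fuel-0 default is never reached: semantics exact on every input)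
def pvWhileGo : Nat → Int → Int → Int → Int × Int
  | 0, _, q, r => (q, r)
  | f + 1, n, q, r => if q + r < n then pvWhileGo f n (q - 1) (r + 26) else (q, r)

def pvWhile (n q r : Int) : Int × Int := pvWhileGo (n - (q + r)).toNat n q r

-- helper(q, r); within Pre_ the ascii index is in [0, 25] so pyGet?'s .getD default is never
-- used (outside Pre_ Python raises IndexError there — those inputs are excluded by Pre_).
-- After the while loop q + r ≥ n, so the recursion depth is at most 1: fuel 1 is exact on
-- every input and the fuel-0 default is never reached.
def pvHelper (fuel : Nat) (n q r : Int) : List Char :=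
  if q + r = n then pvRep 'a' r ++ pvRep 'z' q
  else if q + r > n then
    pvRep 'a' (n - q - 1) ++ [(PySem.List.pyGet? pvAscii (r - (n - q - 1) - 1)).getD 'a'] ++ pvRep 'z' q
  else
    match fuel with
    | 0 => []
    | f + 1 => pvHelper f n (pvWhile n q r).1 (pvWhile n q r).2

def getSmallestString1 (n : Int) (k : Int) : String :=
  String.ofList (pvHelper 1 n (PySem.Int.floordiv k 26) (PySem.Int.mod k 26))

-- ===== PORT B =====
-- 'c' * m on B's side — exact
def pvRepB (c : Char) (m : Int) : List Char := List.replicate m.toNat c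

-- string.ascii_lowercase on B's side
def pvAsciiB : List Char := "abcdefghijklmnopqrstuvwxyz".toList

-- if q + r < n: apply the closed-form j = (n - q - r + 24) // 25 re-balancing steps at once
def pvAdjust (n q r : Int) : Int × Int :=
  if q + r < n then
    (q - PySem.Int.floordiv (n - q - r + 24) 25, r + 26 * PySem.Int.floordiv (n - q - r + 24) 25)
  else (q, r)

def pvFinish (n q r : Int) : String :=
  if q + r = n then String.ofList (pvRepB 'a' r ++ pvRepB 'z' q)
  else
    String.ofList (pvRepB 'a' (n - q - 1) ++
      [(PySem.List.pyGet? pvAsciiB (q + r - n)).getD 'a'] ++ pvRepB 'z' q)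

def getSmallestString1_alt (n : Int) (k : Int) : String :=
  let p := pvAdjust n (PySem.Int.floordiv k 26) (PySem.Int.mod k 26)
  pvFinish n p.1 p.2

-- ===== PRECONDITION & SPEC =====
-- Pre_ is exactly the set of inputs where A returns: with q, r = divmod(k, 26), A raises
-- IndexError (ascii_lowercase[q + r - n] with q + r - n ≥ 26) iff q + r > n + 25; B raises
-- on the same inputs.
def Pre_getSmallestString1 (n : Int) (k : Int) : Prop :=
  PySem.Int.floordiv k 26 + PySem.Int.mod k 26 ≤ n + 25
instance (n : Int) (k : Int) : Decidable (Pre_getSmallestString1 n k) := by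
  unfold Pre_getSmallestString1; infer_instance

def pvWitness_getSmallestString1 : Int × Int := (3, 27)

def Spec_getSmallestString1 (n : Int) (k : Int) (out : String) : Prop := out = getSmallestString1_alt n k
instance (n : Int) (k : Int) (out : String) : Decidable (Spec_getSmallestString1 n k out) := by unfold Spec_getSmallestString1; infer_instance

-- ===== CLAIM (what is proved, stated in full; the proofs are below) =====
def Claim_equal_getSmallestString1 : Prop := ∀ (n : Int) (k : Int), Dom_getSmallestString1 n k → Pre_getSmallestString1 n k → Spec_getSmallestString1 n k (getSmallestString1 n k)

-- ===== LEMMAS AND PROOFS =====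

-- the while loop computes B's closed form: j = (n - q - r + 24) / 25 steps at once
theorem pvWhileGo_closed (f : Nat) (n q r : Int) (hf : (n - (q + r)).toNat ≤ f)
    (hlt : q + r < n) :
    pvWhileGo f n q r = (q - (n - q - r + 24) / 25, r + 26 * ((n - q - r + 24) / 25)) := by
  induction f generalizing q r with
  | zero => omega
  | succ f ih =>
    rw [pvWhileGo, if_pos hlt]
    by_cases h2 : (q - 1) + (r + 26) < n
    · rw [ih (q - 1) (r + 26) (by omega) h2]
      have h3 : (n - (q - 1) - (r + 26) + 24) / 25 = (n - q - r + 24) / 25 - 1 := by omega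
      rw [h3]
      simp only [Prod.mk.injEq]
      constructor <;> omega
    · have h1 : (n - q - r + 24) / 25 = 1 := by omega
      have hstop : pvWhileGo f n (q - 1) (r + 26) = (q - 1, r + 26) := by
        rcases f with _ | f
        · rfl
        · rw [pvWhileGo, if_neg h2]
      rw [hstop, h1]
      simp only [Prod.mk.injEq]
      exact ⟨trivial, by omega⟩

-- the while loop IS B's one-shot adjustment
theorem pvWhile_eq_adjust (n q r : Int) : pvWhile n q r = pvAdjust n q r := by
  unfold pvWhile pvAdjust
  by_cases hlt : q + r < n
  · rw [if_pos hlt, pvWhileGo_closed (n - (q + r)).toNat n q r le_rfl hlt]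
    rw [PySem.Int.floordiv_eq_ediv_of_pos (by omega)]
  · rw [if_neg hlt]
    rcases h : (n - (q + r)).toNat with _ | f <;> simp [pvWhileGo, if_neg hlt]

-- once q + r ≥ n, A's helper produces exactly B's two final branches (any fuel)
theorem pvTail (fuel : Nat) (n q r : Int) (hge : n ≤ q + r) :
    String.ofList (pvHelper fuel n q r) = pvFinish n q r := by
  rw [pvHelper.eq_def, pvFinish]
  by_cases heq : q + r = n
  · rw [if_pos heq, if_pos heq]
    rfl
  · rw [if_neg heq, if_neg heq, if_pos (show q + r > n by omega)]
    have hidx : r - (n - q - 1) - 1 = q + r - n := by ring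
    rw [hidx]
    rfl

-- both ports compute the same string on every input
theorem pvPorts_eq (n k : Int) : getSmallestString1 n k = getSmallestString1_alt n k := by
  unfold getSmallestString1 getSmallestString1_alt
  set q0 := PySem.Int.floordiv k 26 with hq0
  set r0 := PySem.Int.mod k 26 with hr0
  show String.ofList (pvHelper 1 n q0 r0) = pvFinish n (pvAdjust n q0 r0).1 (pvAdjust n q0 r0).2
  by_cases hlt : q0 + r0 < n
  · -- the loop runs: both sides land on (q0 - j, r0 + 26j) with q + r ≥ n
    have hadj : pvAdjust n q0 r0
        = (q0 - (n - q0 - r0 + 24) / 25, r0 + 26 * ((n - q0 - r0 + 24) / 25)) := by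
      unfold pvAdjust
      rw [if_pos hlt, PySem.Int.floordiv_eq_ediv_of_pos (by omega)]
    have hsum : n ≤ (q0 - (n - q0 - r0 + 24) / 25) + (r0 + 26 * ((n - q0 - r0 + 24) / 25)) := by
      omega
    rw [pvHelper.eq_def, if_neg (by omega), if_neg (by omega)]
    rw [show (pvWhile n q0 r0) = _ from (pvWhile_eq_adjust n q0 r0).trans hadj, hadj]
    exact pvTail 0 n _ _ hsum
  · -- no loop: both sides keep (q0, r0)
    have hadj : pvAdjust n q0 r0 = (q0, r0) := by
      unfold pvAdjust
      rw [if_neg hlt]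
    rw [hadj]
    exact pvTail 1 n q0 r0 (by omega)

-- ===== VERDICT (by name: the statement is the Claim_ definition above) =====
theorem getSmallestString1_spec : Claim_equal_getSmallestString1 := by
  intro n k _ _
  unfold Spec_getSmallestString1
  exact pvPorts_eq n k
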